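-- pv_equiv track=rewrite | github.com/bluehercules/identify-cheaters-pubg | assignment-final-bluehercules/dictionary_methods.py | slicing_teams
-- ===== SOURCE A (Python) =====
-- def add_dictionary_items(dictionary, key, value, sets=False):
--     ''' Adds a value to a pre-existing dictionary.
--     If the key where the value is to be inputted does
--     not exist then the key is also create within the
--     dictionary. If sets is set to True then the value is
--     not added to the key if it is already there.
--     The function returns the dictionary but
--     it is important for the user to know that this
--     function changes the dictionary in place and does
--     not create a copy.
--     '''
--
--     if key in dictionary:
--         if sets == False:
--             dictionary[key].append(value)
--         else:
--             if value not in dictionary[key]: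
--                 dictionary[key].append(value)
--     else:
--         dictionary[key] = [value]
--
-- def slicing_teams(teams_data, cheaters_directory):
--     ''' The purpose of this funciton is to slice the
--     teams data into three dictionaries'''
--
--     match_teams_cheaters = {}
--     match_teams = {}
--     match_players = {}
--
--     for r in range(len(teams_data)):
--         match = teams_data[r][0]
--         player = teams_data[r][1]
--         team = teams_data[r][2]
--
--         if player in cheaters_directory:
--             add_dictionary_items(match_teams_cheaters, match, team)
--
--         add_dictionary_items(match_teams, match, team, sets=True)
--         add_dictionary_items(match_players, match, player)
--
--     return match_teams_cheaters, match_teams, match_players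
-- ===== SOURCE B (Python) =====
-- def slicing_teams(teams_data, cheaters_directory):
--     ''' Slice the teams data into three dictionaries:
--     group the rows by match once, then derive the team and
--     player dictionaries from that grouping. '''
--
--     # one pass: match -> list of its (player, team) rows, in encounter order
--     index = {}
--     for row in teams_data:
--         index.setdefault(row[0], []).append((row[1], row[2]))
--
--     match_teams = {}
--     match_players = {}
--     for match, rows in index.items():
--         match_teams[match] = list(dict.fromkeys(team for _, team in rows))
--         match_players[match] = [player for player, _ in rows]
--
--     # cheater teams keyed in the order a cheater row first appears
--     cheaters = set(cheaters_directory)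
--     match_teams_cheaters = {}
--     for row in teams_data:
--         if row[1] in cheaters:
--             match_teams_cheaters.setdefault(row[0], []).append(row[2])
--
--     return match_teams_cheaters, match_teams, match_players
-- ===== Notes on version B (the rewrite author's own statement) =====
-- stated objective: alternative
-- what changed: B replaces A's single fused index-loop with per-row dictionary-helper calls by a group-by decomposition: one pass builds an index match -> list of (player, team) rows, match_teams (via dict.fromkeys dedup) and match_players are derived per match from that index, and the cheater dictionary is built by a separate filtered pass using a set of cheaters.
import Mathlib
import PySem

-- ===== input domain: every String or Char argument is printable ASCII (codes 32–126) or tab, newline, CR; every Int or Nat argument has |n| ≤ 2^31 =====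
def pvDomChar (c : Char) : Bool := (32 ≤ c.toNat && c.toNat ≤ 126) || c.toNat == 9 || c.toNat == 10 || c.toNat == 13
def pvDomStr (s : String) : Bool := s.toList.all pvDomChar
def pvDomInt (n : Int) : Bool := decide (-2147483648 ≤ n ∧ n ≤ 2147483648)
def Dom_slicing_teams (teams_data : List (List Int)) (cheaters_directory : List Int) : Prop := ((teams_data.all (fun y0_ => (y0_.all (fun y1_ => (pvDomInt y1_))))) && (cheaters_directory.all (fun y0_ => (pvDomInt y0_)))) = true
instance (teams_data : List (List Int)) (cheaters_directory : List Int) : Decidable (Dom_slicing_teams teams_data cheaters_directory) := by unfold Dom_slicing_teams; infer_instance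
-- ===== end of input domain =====

-- B regroups A's single fused loop into a group-by-match index pass plus derivation passes (alternative decomposition);
-- only return values are compared (the Python helper mutates its dict argument, but all three dicts are created inside A).

-- ===== PORT A =====
-- helper add_dictionary_items (in Python it mutates `dictionary`; here it returns the updated dict)
def addDictItems (d : PySem.Dict Int (List Int)) (key : Int) (value : Int) (sets : Bool) :
    PySem.Dict Int (List Int) :=
  if d.contains key then
    if sets == false then
      d.insert key (d.getD key [] ++ [value])
    else
      if (d.getD key []).contains value then d
      else d.insert key (d.getD key [] ++ [value])
  else
    d.insert key [value]

def slicing_teams (teams_data : List (List Int)) (cheaters_directory : List Int) :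
    (List (Int × List Int)) × (List (Int × List Int)) × (List (Int × List Int)) :=
  -- for r in range(len(teams_data)): …
  let st := (PySem.List.pyRange 0 (PySem.List.len teams_data)).foldl
    (fun st r =>
      let row := PySem.List.pyGetD teams_data r []
      let m := PySem.List.pyGetD row 0 0        -- teams_data[r][0]
      let player := PySem.List.pyGetD row 1 0   -- teams_data[r][1]
      let team := PySem.List.pyGetD row 2 0     -- teams_data[r][2]
      (if cheaters_directory.contains player then addDictItems st.1 m team false else st.1,
       addDictItems st.2.1 m team true,
       addDictItems st.2.2 m player false))
    (PySem.Dict.empty, PySem.Dict.empty, PySem.Dict.empty)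
  (st.1.items, st.2.1.items, st.2.2.items)

-- ===== PORT B =====
def slicing_teams_alt (teams_data : List (List Int)) (cheaters_directory : List Int) :
    (List (Int × List Int)) × (List (Int × List Int)) × (List (Int × List Int)) :=
  -- index.setdefault(row[0], []).append((row[1], row[2]))
  let index : PySem.Dict Int (List (Int × Int)) :=
    teams_data.foldl (fun d row =>
      d.modify (PySem.List.pyGetD row 0 0) []
        (fun rs => rs ++ [(PySem.List.pyGetD row 1 0, PySem.List.pyGetD row 2 0)]))
      PySem.Dict.empty
  -- for match, rows in index.items(): …  (list(dict.fromkeys(…)) is PySem.List.dedup)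
  let tp := index.items.foldl
    (fun (st : PySem.Dict Int (List Int) × PySem.Dict Int (List Int)) it =>
      (st.1.insert it.1 (PySem.List.dedup (it.2.map (fun x => x.2))),
       st.2.insert it.1 (it.2.map (fun x => x.1))))
    (PySem.Dict.empty, PySem.Dict.empty)
  -- cheaters = set(cheaters_directory); separate filtered pass
  let cheats : PySem.Set Int := PySem.Set.ofList cheaters_directory
  let mtc := teams_data.foldl (fun d row =>
      if cheats.contains (PySem.List.pyGetD row 1 0) then
        d.modify (PySem.List.pyGetD row 0 0) [] (fun ts => ts ++ [PySem.List.pyGetD row 2 0])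
      else d)
    PySem.Dict.empty
  (mtc.items, tp.1.items, tp.2.items)

-- ===== PRECONDITION & SPEC =====
-- Pre_ excludes rows with fewer than 3 entries, on which the Python A (and B) raise IndexError.
def Pre_slicing_teams (teams_data : List (List Int)) (cheaters_directory : List Int) : Prop :=
  ∀ row ∈ teams_data, 3 ≤ row.length
instance (teams_data : List (List Int)) (cheaters_directory : List Int) : Decidable (Pre_slicing_teams teams_data cheaters_directory) := by unfold Pre_slicing_teams; infer_instance
def pvWitness_slicing_teams : List (List Int) × List Int := ([[1, 4, 10], [1, 5, 11], [2, 4, 20]], [4])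

def Spec_slicing_teams (teams_data : List (List Int)) (cheaters_directory : List Int) (out : (List (Int × List Int)) × (List (Int × List Int)) × (List (Int × List Int))) : Prop := out = slicing_teams_alt teams_data cheaters_directory
instance (teams_data : List (List Int)) (cheaters_directory : List Int) (out : (List (Int × List Int)) × (List (Int × List Int)) × (List (Int × List Int))) : Decidable (Spec_slicing_teams teams_data cheaters_directory out) := by unfold Spec_slicing_teams; infer_instance

-- ===== CLAIM (what is proved, stated in full; the proofs are below) =====
def Claim_equal_slicing_teams : Prop := ∀ (teams_data : List (List Int)) (cheaters_directory : List Int), Dom_slicing_teams teams_data cheaters_directory → Pre_slicing_teams teams_data cheaters_directory → Spec_slicing_teams teams_data cheaters_directory (slicing_teams teams_data cheaters_directory)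

-- ===== LEMMAS AND PROOFS =====

-- row projections shared by both loop bodies
def rowK (row : List Int) : Int := PySem.List.pyGetD row 0 0
def rowP (row : List Int) : Int := PySem.List.pyGetD row 1 0
def rowT (row : List Int) : Int := PySem.List.pyGetD row 2 0

-- canonical single-dict folds both ports are reduced to
def mC (td : List (List Int)) (cd : List Int) : PySem.Dict Int (List Int) :=
  td.foldl (fun d row =>
    if cd.contains (rowP row) then d.modify (rowK row) [] (fun vs => vs ++ [rowT row]) else d)
    PySem.Dict.empty
def mT (td : List (List Int)) : PySem.Dict Int (List Int) :=
  td.foldl (fun d row => d.modify (rowK row) [] (fun vs => PySem.Set.add vs (rowT row))) PySem.Dict.empty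
def mP (td : List (List Int)) : PySem.Dict Int (List Int) :=
  td.foldl (fun d row => d.modify (rowK row) [] (fun vs => vs ++ [rowP row])) PySem.Dict.empty
def mI (td : List (List Int)) : PySem.Dict Int (List (Int × Int)) :=
  td.foldl (fun d row => d.modify (rowK row) [] (fun rs => rs ++ [(rowP row, rowT row)])) PySem.Dict.empty
def bC (td : List (List Int)) (cd : List Int) : PySem.Dict Int (List Int) :=
  td.foldl (fun d row =>
    if (PySem.Set.ofList cd).contains (rowP row) then d.modify (rowK row) [] (fun ts => ts ++ [rowT row]) else d)
    PySem.Dict.empty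
def bT (td : List (List Int)) : PySem.Dict Int (List Int) :=
  (mI td).items.foldl (fun d it => d.insert it.1 (PySem.List.dedup (it.2.map (fun x => x.2)))) PySem.Dict.empty
def bP (td : List (List Int)) : PySem.Dict Int (List Int) :=
  (mI td).items.foldl (fun d it => d.insert it.1 (it.2.map (fun x => x.1))) PySem.Dict.empty

theorem foldl_triple_mk {β σ₁ σ₂ σ₃ : Type} (f : σ₁ → β → σ₁) (g : σ₂ → β → σ₂) (h : σ₃ → β → σ₃)
    (l : List β) (a : σ₁) (b : σ₂) (c : σ₃) :
    l.foldl (fun s e => (f s.1 e, g s.2.1 e, h s.2.2 e)) (a, b, c) =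
      (l.foldl f a, l.foldl g b, l.foldl h c) := by
  have := PySem.List.foldl_prod_mk f (fun s e => (g s.1 e, h s.2 e)) l a (b, c)
  rw [PySem.List.foldl_prod_mk] at this
  exact this

theorem getD_of_contains_eq_false (d : PySem.Dict Int (List Int)) (k : Int)
    (h : d.contains k = false) : d.getD k [] = [] := by
  simp only [PySem.Dict.contains, List.any_eq_false] at h
  simp [PySem.Dict.getD, PySem.Dict.get?, List.find?_eq_none.mpr h]

theorem insert_getD_self (d : PySem.Dict Int (List Int)) (k : Int)
    (hnd : d.keys.Nodup) (h : d.contains k = true) :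
    d.insert k (d.getD k []) = d := by
  simp only [PySem.Dict.contains, List.any_eq_true] at h
  obtain ⟨p0, hp0, hp0k⟩ := h
  obtain ⟨pr, hfind⟩ : ∃ pr, d.items.find? (fun p => p.1 == k) = some pr := by
    have hs : (d.items.find? (fun p => p.1 == k)).isSome := List.find?_isSome.mpr ⟨p0, hp0, hp0k⟩
    rcases Option.isSome_iff_exists.mp hs with ⟨pr, hpr⟩
    exact ⟨pr, hpr⟩
  have hmem := List.mem_of_find?_eq_some hfind
  have hk : pr.1 = k := by simpa using List.find?_some hfind
  have hget : d.getD k [] = pr.2 := by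
    simp [PySem.Dict.getD, PySem.Dict.get?, hfind]
  have hcont : d.contains k = true := by
    simp only [PySem.Dict.contains, List.any_eq_true]; exact ⟨p0, hp0, by exact hp0k⟩
  apply PySem.Dict.ext
  rw [show d.insert k (d.getD k []) = ⟨List.map (fun p => if (p.1 == k) = true then (k, d.getD k []) else p) d.items⟩ from by
    unfold PySem.Dict.insert; rw [if_pos hcont]]
  show List.map (fun p => if (p.1 == k) = true then (k, d.getD k []) else p) d.items = d.items
  have hinj := List.inj_on_of_nodup_map (f := fun p : Int × List Int => p.1) (by exact hnd)
  calc List.map (fun p => if (p.1 == k) = true then (k, d.getD k []) else p) d.items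
      = List.map id d.items := by
        apply List.map_congr_left
        intro p hp
        by_cases hpk : p.1 = k
        · have hppr : p = pr := hinj hp hmem (by rw [hpk, hk])
          show (if (p.1 == k) = true then (k, d.getD k []) else p) = id p
          rw [if_pos (beq_iff_eq.mpr hpk), hget, hppr]
          exact Prod.ext_iff.mpr ⟨hk.symm, rfl⟩
        · simp [hpk]
    _ = d.items := List.map_id d.items

theorem addDictItems_false (d : PySem.Dict Int (List Int)) (k v : Int) :
    addDictItems d k v false = d.modify k [] (fun vs => vs ++ [v]) := by
  by_cases h : d.contains k
  · simp [addDictItems, h, PySem.Dict.modify]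
  · simp only [Bool.not_eq_true] at h
    simp [addDictItems, h, PySem.Dict.modify, getD_of_contains_eq_false d k h]

theorem addDictItems_true (d : PySem.Dict Int (List Int)) (k v : Int) (hnd : d.keys.Nodup) :
    addDictItems d k v true = d.modify k [] (fun vs => PySem.Set.add vs v) := by
  by_cases h : d.contains k
  · rw [addDictItems, if_pos h, if_neg (by decide)]
    unfold PySem.Dict.modify PySem.Set.add PySem.Set.contains
    beta_reduce
    by_cases hv : (d.getD k []).contains v
    · rw [if_pos hv, if_pos hv]
      exact (insert_getD_self d k hnd h).symm
    · simp only [Bool.not_eq_true] at hv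
      rw [if_neg (by rw [hv]; exact Bool.false_ne_true), if_neg (by rw [hv]; exact Bool.false_ne_true)]
  · simp only [Bool.not_eq_true] at h
    rw [addDictItems, if_neg (by rw [h]; exact Bool.false_ne_true)]
    unfold PySem.Dict.modify PySem.Set.add PySem.Set.contains
    beta_reduce
    rw [getD_of_contains_eq_false d k h]
    rw [if_neg (by simp), List.nil_append]

theorem nodup_keys_modify (d : PySem.Dict Int (List Int)) (k : Int) (f : List Int → List Int)
    (hnd : d.keys.Nodup) : (d.modify k [] f).keys.Nodup := by
  have h := PySem.Dict.nodup_keys_foldl_modify_key (l := [()]) (key := fun _ => k)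
    (d0 := ([] : List Int)) (f := fun _ _ vs => f vs) d hnd
  simpa using h

theorem foldl_addTrue (l : List (List Int)) (d : PySem.Dict Int (List Int)) (hnd : d.keys.Nodup) :
    l.foldl (fun d row => addDictItems d (rowK row) (rowT row) true) d =
      l.foldl (fun d row => d.modify (rowK row) [] (fun vs => PySem.Set.add vs (rowT row))) d := by
  induction l generalizing d with
  | nil => rfl
  | cons r l ih =>
      simp only [List.foldl_cons, addDictItems_true _ _ _ hnd]
      exact ih _ (nodup_keys_modify _ _ _ hnd)

theorem contains_ofList (l : List Int) (x : Int) :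
    (PySem.Set.ofList l).contains x = l.contains x := by
  rw [Bool.eq_iff_iff]
  simp only [PySem.Set.contains, List.contains_iff_mem]
  exact PySem.Set.mem_ofList l x

theorem getD_foldl_modify_setadd (l : List (Int × Int)) (d : PySem.Dict Int (List Int)) (c : Int) :
    (l.foldl (fun d p => d.modify p.1 [] (fun vs => PySem.Set.add vs p.2)) d).getD c [] =
      ((l.filter (fun p => p.1 == c)).map (fun p => p.2)).foldl PySem.Set.add (d.getD c []) := by
  induction l generalizing d with
  | nil => rfl
  | cons p l ih =>
      simp only [List.foldl_cons, List.filter_cons]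
      by_cases h : p.1 = c
      · rw [if_pos (beq_iff_eq.mpr h), List.map_cons, List.foldl_cons, ih]
        congr 1
        show (d.insert p.1 (PySem.Set.add (d.getD p.1 []) p.2)).getD c [] = _
        rw [← h]
        exact PySem.Dict.getD_insert_self d p.1 _ []
      · rw [if_neg (by simpa using h), ih]
        congr 1
        show (d.insert p.1 (PySem.Set.add (d.getD p.1 []) p.2)).getD c [] = d.getD c []
        exact PySem.Dict.getD_insert_of_ne d _ [] (fun hc => h hc.symm)

theorem filter_map_proj {γ : Type} (l : List (List Int)) (k : Int) (f : List Int → γ) :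
    ((l.map (fun r => (rowK r, f r))).filter (fun p => p.1 == k)).map (fun p => p.2) =
      (l.filter (fun r => rowK r == k)).map f := by
  induction l with
  | nil => rfl
  | cons r l ih =>
      by_cases h : rowK r == k <;> simp [h, ih]

theorem empty_keys_nodup : (PySem.Dict.empty : PySem.Dict Int (List Int)).keys.Nodup := List.nodup_nil

-- port A reduced to the canonical folds
theorem portA_eq (td : List (List Int)) (cd : List Int) :
    slicing_teams td cd = ((mC td cd).items, (mT td).items, (mP td).items) := by
  have h := PySem.List.foldl_pyRange_pyGetD td ([] : List Int)
    (fun (st : PySem.Dict Int (List Int) × PySem.Dict Int (List Int) × PySem.Dict Int (List Int)) row =>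
      ((fun (d : PySem.Dict Int (List Int)) row => if cd.contains (rowP row) then addDictItems d (rowK row) (rowT row) false else d) st.1 row,
       (fun (d : PySem.Dict Int (List Int)) row => addDictItems d (rowK row) (rowT row) true) st.2.1 row,
       (fun (d : PySem.Dict Int (List Int)) row => addDictItems d (rowK row) (rowP row) false) st.2.2 row))
    (PySem.Dict.empty, PySem.Dict.empty, PySem.Dict.empty) (a := 0) le_rfl
  have h2 := foldl_triple_mk
    (fun (d : PySem.Dict Int (List Int)) row => if cd.contains (rowP row) then addDictItems d (rowK row) (rowT row) false else d)
    (fun (d : PySem.Dict Int (List Int)) row => addDictItems d (rowK row) (rowT row) true)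
    (fun (d : PySem.Dict Int (List Int)) row => addDictItems d (rowK row) (rowP row) false)
    td PySem.Dict.empty PySem.Dict.empty PySem.Dict.empty
  have h4 : td.foldl (fun (d : PySem.Dict Int (List Int)) row => if cd.contains (rowP row) then addDictItems d (rowK row) (rowT row) false else d) PySem.Dict.empty = mC td cd := by
    unfold mC; simp only [addDictItems_false]
  have h3 : td.foldl (fun (d : PySem.Dict Int (List Int)) row => addDictItems d (rowK row) (rowT row) true) PySem.Dict.empty = mT td :=
    foldl_addTrue td PySem.Dict.empty empty_keys_nodup
  have h5 : td.foldl (fun (d : PySem.Dict Int (List Int)) row => addDictItems d (rowK row) (rowP row) false) PySem.Dict.empty = mP td := by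
    unfold mP; simp only [addDictItems_false]
  calc slicing_teams td cd
      = ((td.foldl (fun (d : PySem.Dict Int (List Int)) row => if cd.contains (rowP row) then addDictItems d (rowK row) (rowT row) false else d) PySem.Dict.empty).items,
         (td.foldl (fun (d : PySem.Dict Int (List Int)) row => addDictItems d (rowK row) (rowT row) true) PySem.Dict.empty).items,
         (td.foldl (fun (d : PySem.Dict Int (List Int)) row => addDictItems d (rowK row) (rowP row) false) PySem.Dict.empty).items) :=
        congrArg (fun st : PySem.Dict Int (List Int) × PySem.Dict Int (List Int) × PySem.Dict Int (List Int) =>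
          (st.1.items, st.2.1.items, st.2.2.items)) (h.trans h2)
    _ = ((mC td cd).items, (mT td).items, (mP td).items) := by rw [h3, h4, h5]

-- port B reduced to the canonical folds
theorem portB_eq (td : List (List Int)) (cd : List Int) :
    slicing_teams_alt td cd = ((bC td cd).items, (bT td).items, (bP td).items) := by
  have h := PySem.List.foldl_prod_mk
    (fun (d : PySem.Dict Int (List Int)) (it : Int × List (Int × Int)) => d.insert it.1 (PySem.List.dedup (it.2.map (fun x => x.2))))
    (fun (d : PySem.Dict Int (List Int)) (it : Int × List (Int × Int)) => d.insert it.1 (it.2.map (fun x => x.1)))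
    (mI td).items PySem.Dict.empty PySem.Dict.empty
  exact congrArg (fun p : PySem.Dict Int (List Int) × PySem.Dict Int (List Int) =>
    ((bC td cd).items, p.1.items, p.2.items)) h

theorem mC_eq_bC (td : List (List Int)) (cd : List Int) : mC td cd = bC td cd := by
  unfold mC bC
  simp only [contains_ofList]

-- keys of the modify folds
theorem keys_mP (td : List (List Int)) : (mP td).keys = PySem.Set.update [] (td.map rowK) :=
  PySem.Dict.keys_foldl_modify_key td rowK [] (fun _ row vs => vs ++ [rowP row]) PySem.Dict.empty
theorem keys_mT (td : List (List Int)) : (mT td).keys = PySem.Set.update [] (td.map rowK) :=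
  PySem.Dict.keys_foldl_modify_key td rowK [] (fun _ row vs => PySem.Set.add vs (rowT row)) PySem.Dict.empty
theorem keys_mI (td : List (List Int)) : (mI td).keys = PySem.Set.update [] (td.map rowK) :=
  PySem.Dict.keys_foldl_modify_key td rowK [] (fun _ row rs => rs ++ [(rowP row, rowT row)]) PySem.Dict.empty
theorem nodup_mP (td : List (List Int)) : (mP td).keys.Nodup :=
  PySem.Dict.nodup_keys_foldl_modify_key td rowK [] (fun _ row vs => vs ++ [rowP row]) PySem.Dict.empty empty_keys_nodup
theorem nodup_mT (td : List (List Int)) : (mT td).keys.Nodup :=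
  PySem.Dict.nodup_keys_foldl_modify_key td rowK [] (fun _ row vs => PySem.Set.add vs (rowT row)) PySem.Dict.empty empty_keys_nodup
theorem nodup_mI (td : List (List Int)) : (mI td).keys.Nodup :=
  PySem.Dict.nodup_keys_foldl_modify_key td rowK [] (fun _ row rs => rs ++ [(rowP row, rowT row)]) PySem.Dict.empty List.nodup_nil

-- pointwise values
theorem getD_mP (td : List (List Int)) (k : Int) :
    (mP td).getD k [] = (td.filter (fun r => rowK r == k)).map rowP := by
  have h : mP td = (td.map (fun r => (rowK r, rowP r))).foldl
      (fun d p => d.modify p.1 [] (fun vs => vs ++ [p.2])) PySem.Dict.empty := by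
    rw [List.foldl_map]; rfl
  rw [h, PySem.Dict.getD_foldl_modify_append, filter_map_proj]
  rfl

theorem getD_mI (td : List (List Int)) (k : Int) :
    (mI td).getD k [] = (td.filter (fun r => rowK r == k)).map (fun r => (rowP r, rowT r)) := by
  have h : mI td = (td.map (fun r => (rowK r, (rowP r, rowT r)))).foldl
      (fun d p => d.modify p.1 [] (fun rs => rs ++ [p.2])) PySem.Dict.empty := by
    rw [List.foldl_map]; rfl
  rw [h, PySem.Dict.getD_foldl_modify_append, filter_map_proj]
  rfl

theorem getD_mT (td : List (List Int)) (k : Int) :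
    (mT td).getD k [] = PySem.List.dedup ((td.filter (fun r => rowK r == k)).map rowT) := by
  have h : mT td = (td.map (fun r => (rowK r, rowT r))).foldl
      (fun d p => d.modify p.1 [] (fun vs => PySem.Set.add vs p.2)) PySem.Dict.empty := by
    rw [List.foldl_map]; rfl
  rw [h, getD_foldl_modify_setadd, filter_map_proj]
  rfl

theorem fresh_empty (td : List (List Int)) :
    ∀ a ∈ (mI td).items, (PySem.Dict.empty : PySem.Dict Int (List Int)).contains a.1 = false := by
  intro a _; rfl

theorem items_P (td : List (List Int)) : (mP td).items = (bP td).items := by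
  have hbP : (bP td).items =
      (PySem.Dict.empty : PySem.Dict Int (List Int)).items ++
        (mI td).items.map (fun it => (it.1, it.2.map (fun x => x.1))) := by
    unfold bP
    exact PySem.Dict.items_foldl_insert_fresh (mI td).items (fun it => it.1)
      (fun it => it.2.map (fun x : Int × Int => x.1)) PySem.Dict.empty (fresh_empty td) (nodup_mI td)
  rw [hbP, PySem.Dict.items_eq_map_keys (mI td) (nodup_mI td) [],
      PySem.Dict.items_eq_map_keys (mP td) (nodup_mP td) [], List.map_map,
      keys_mP, keys_mI,
      show (PySem.Dict.empty : PySem.Dict Int (List Int)).items = [] from rfl, List.nil_append]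
  apply List.map_congr_left
  intro k _
  show (k, (mP td).getD k []) = (k, ((mI td).getD k []).map (fun x => x.1))
  rw [getD_mP, getD_mI, List.map_map]
  rfl

theorem items_T (td : List (List Int)) : (mT td).items = (bT td).items := by
  have hbT : (bT td).items =
      (PySem.Dict.empty : PySem.Dict Int (List Int)).items ++
        (mI td).items.map (fun it => (it.1, PySem.List.dedup (it.2.map (fun x => x.2)))) := by
    unfold bT
    exact PySem.Dict.items_foldl_insert_fresh (mI td).items (fun it => it.1)
      (fun it => PySem.List.dedup (it.2.map (fun x : Int × Int => x.2))) PySem.Dict.empty (fresh_empty td) (nodup_mI td)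
  rw [hbT, PySem.Dict.items_eq_map_keys (mI td) (nodup_mI td) [],
      PySem.Dict.items_eq_map_keys (mT td) (nodup_mT td) [], List.map_map,
      keys_mT, keys_mI,
      show (PySem.Dict.empty : PySem.Dict Int (List Int)).items = [] from rfl, List.nil_append]
  apply List.map_congr_left
  intro k _
  show (k, (mT td).getD k []) = (k, PySem.List.dedup (((mI td).getD k []).map (fun x => x.2)))
  rw [getD_mT, getD_mI, List.map_map]
  rfl

-- ===== VERDICT (by name: the statement is the Claim_ definition above) =====
theorem slicing_teams_spec : Claim_equal_slicing_teams := by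
  intro td cd _ _
  show slicing_teams td cd = slicing_teams_alt td cd
  rw [portA_eq, portB_eq, mC_eq_bC, items_P, items_T]
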